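-- pv_equiv track=rewrite | github.com/HendrikKuehne/belief_propagation | belief_propagation/utils.py | get_disjoint_subsets_from_opchains
-- ===== SOURCE A (Python) =====
-- from typing import List, Dict, Tuple, FrozenSet, Callable
--
-- def is_disjoint_layer(
--         layer: Tuple[Dict[int, tuple]],
--         op_chain: Dict[int, tuple] = dict()
--     ) -> bool:
--     """
--     Tests if the set `op_chains` of operator chains is disjoint,
--     i.e. the operator chains in `op_chains` act on different sites.
--     If `op_chain` is given, tests if `op_chains` is disjoint upon
--     addition of `op_chain`.
--     """
--     new_sites = set(op_chain.keys())
--     for op_chain_ in layer: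
--         if len(new_sites & set(op_chain_.keys())) > 0: return False
--
--     return True
--
-- def get_disjoint_subsets_from_opchains(
--         op_chains: Tuple[Dict[int, tuple]]
--     ) -> Tuple[Tuple[Tuple[Dict[int, tuple]]]]:
--     """
--     Given operator chains, decomposes them into as many
--     disjoint subsets as are necessary for a brick wall
--     layout. Returns a tuple containing the single-site
--     layers, and a tuple containing the multi-site layers
--     (aka brick-wall layers).
--     """
--     # Layers of the hamiltonian are sets of operators, s.t. all operators
--     # within the layer commute. This is achieved by grouping spatially disjoint
--     # operators together in the layers. Single-site operators will be grouped
--     # separately.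
--     singlesite_layers = [(),]
--     brick_wall_layers = [(),]
--
--     for op_chain in op_chains:
--         if len(op_chain.keys()) == 1:
--             # Single-site operators will be grouped in one chain.
--             iLayer = 0
--             while not is_disjoint_layer(singlesite_layers[iLayer], op_chain):
--                 iLayer += 1
--                 if len(singlesite_layers) == iLayer: singlesite_layers += [(),]
--             singlesite_layers[iLayer] += (op_chain,)
--
--         else:
--             # Single-site operators will be grouped in one chain.
--             iLayer = 0
--             while not is_disjoint_layer(brick_wall_layers[iLayer], op_chain):
--                 iLayer += 1
--                 if len(brick_wall_layers) == iLayer: brick_wall_layers += [(),]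
--             brick_wall_layers[iLayer] += (op_chain,)
--
--     return tuple(singlesite_layers), tuple(brick_wall_layers)
-- ===== SOURCE B (Python) =====
-- def get_disjoint_subsets_from_opchains(op_chains):
--     """First-fit layering via an inverted index site -> occupied layer indices,
--     instead of rescanning every layer's chains for each new chain."""
--     singlesite_layers = [(),]
--     brick_wall_layers = [(),]
--     occ_single = {}  # site -> set of layer indices already touching it
--     occ_brick = {}
--
--     for op_chain in op_chains:
--         if len(op_chain.keys()) == 1:
--             layers, occ = singlesite_layers, occ_single
--         else:
--             layers, occ = brick_wall_layers, occ_brick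
--         used = set()
--         for site in op_chain.keys():
--             used |= occ.get(site, set())
--         iLayer = next(k for k in range(len(layers) + 1) if k not in used)
--         if iLayer == len(layers):
--             layers.append(())
--         layers[iLayer] += (op_chain,)
--         for site in op_chain.keys():
--             occ.setdefault(site, set()).add(iLayer)
--
--     return tuple(singlesite_layers), tuple(brick_wall_layers)
-- ===== Notes on version B (the rewrite author's own statement) =====
-- stated objective: faster
-- what changed: B replaces A's per-chain rescan of every existing layer's chains (intersecting key sets with each placed chain) by an inverted index mapping each site to the set of layer indices already occupied at that site, so each chain's first-fit layer is found from the union of its sites' occupancy sets.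
import Mathlib
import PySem

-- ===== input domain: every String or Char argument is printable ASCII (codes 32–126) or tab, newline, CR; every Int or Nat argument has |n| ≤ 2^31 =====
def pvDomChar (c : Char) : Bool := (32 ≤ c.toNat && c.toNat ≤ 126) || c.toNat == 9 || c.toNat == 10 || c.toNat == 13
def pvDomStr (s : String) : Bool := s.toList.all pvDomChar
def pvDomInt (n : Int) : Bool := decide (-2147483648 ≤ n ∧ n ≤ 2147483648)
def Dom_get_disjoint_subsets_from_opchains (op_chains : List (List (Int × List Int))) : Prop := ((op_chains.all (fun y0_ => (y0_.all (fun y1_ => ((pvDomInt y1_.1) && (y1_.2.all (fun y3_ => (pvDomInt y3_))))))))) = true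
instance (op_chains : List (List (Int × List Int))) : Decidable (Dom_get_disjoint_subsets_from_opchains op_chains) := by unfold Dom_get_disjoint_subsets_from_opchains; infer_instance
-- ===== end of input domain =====

-- B replaces A's per-chain rescan of every layer's chains by an inverted index (site -> occupied
-- layer indices), computing each chain's first-fit layer from that index (objective: faster).

-- ===== PORT A =====
-- set(op_chain.keys()) — the distinct keys of the dict, in insertion order
def pvKeysA (c : List (Int × List Int)) : List Int := PySem.Set.ofList (c.map Prod.fst)

-- is_disjoint_layer(layer, op_chain)
def pvIsDisjointLayer (layer : List (List (Int × List Int))) (c : List (Int × List Int)) : Bool :=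
  layer.all (fun c' => PySem.Set.len (PySem.Set.inter (pvKeysA c) (pvKeysA c')) == 0)

-- the while-loop: scan layers for the first disjoint one, appending a fresh layer when exhausted,
-- and add the chain to that layer
def pvPlaceA (c : List (Int × List Int)) :
    List (List (List (Int × List Int))) → List (List (List (Int × List Int)))
  | [] => [[c]]
  | l :: ls => if pvIsDisjointLayer l c then (l ++ [c]) :: ls else l :: pvPlaceA c ls

-- the body of A's for-loop: route the chain to the single-site or brick-wall track
def pvStepA (st : List (List (List (Int × List Int))) × List (List (List (Int × List Int))))
    (c : List (Int × List Int)) :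
    List (List (List (Int × List Int))) × List (List (List (Int × List Int))) :=
  if PySem.Set.len (pvKeysA c) == 1 then (pvPlaceA c st.1, st.2) else (st.1, pvPlaceA c st.2)

def get_disjoint_subsets_from_opchains (op_chains : List (List (Int × List Int))) :
    List (List (List (List (Int × List Int)))) :=
  let st := op_chains.foldl pvStepA ([[]], [[]])
  [st.1, st.2]

-- ===== PORT B =====
def pvKeysB (c : List (Int × List Int)) : List Int := PySem.Set.ofList (c.map Prod.fst)

-- used = union of occ.get(site, set()) over the chain's sites
def pvUsed (occ : PySem.Dict Int (List Nat)) (ks : List Int) : List Nat :=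
  ks.foldl (fun u s => PySem.Set.union u (occ.getD s PySem.Set.empty)) PySem.Set.empty

-- next(k for k in range(len(layers)+1) if k not in used)
def pvFirstFree (len : Nat) (used : List Nat) : Nat :=
  (((List.range (len + 1)).find? (fun k => !(used.contains k))).getD len)

-- grow the layer list by one when iLayer == len(layers), then layers[iLayer] += (op_chain,)
def pvExtendAt (layers : List (List (List (Int × List Int)))) (i : Nat)
    (c : List (Int × List Int)) : List (List (List (Int × List Int))) :=
  (if i == layers.length then layers ++ [[]] else layers).modify i (fun l => l ++ [c])

-- for site in keys: occ.setdefault(site, set()).add(iLayer)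
def pvOccAdd (occ : PySem.Dict Int (List Nat)) (ks : List Int) (i : Nat) :
    PySem.Dict Int (List Nat) :=
  ks.foldl (fun d s => d.insert s (PySem.Set.add (d.getD s PySem.Set.empty) i)) occ

-- the body of B's for-loop; state = ((singlesite layers, its index), (brick-wall layers, its index))
def pvStepB
    (st : (List (List (List (Int × List Int))) × PySem.Dict Int (List Nat)) ×
          (List (List (List (Int × List Int))) × PySem.Dict Int (List Nat)))
    (c : List (Int × List Int)) :
    (List (List (List (Int × List Int))) × PySem.Dict Int (List Nat)) ×
    (List (List (List (Int × List Int))) × PySem.Dict Int (List Nat)) :=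
  if PySem.Set.len (pvKeysB c) == 1 then
    ((pvExtendAt st.1.1 (pvFirstFree st.1.1.length (pvUsed st.1.2 (pvKeysB c))) c,
      pvOccAdd st.1.2 (pvKeysB c) (pvFirstFree st.1.1.length (pvUsed st.1.2 (pvKeysB c)))), st.2)
  else
    (st.1,
     (pvExtendAt st.2.1 (pvFirstFree st.2.1.length (pvUsed st.2.2 (pvKeysB c))) c,
      pvOccAdd st.2.2 (pvKeysB c) (pvFirstFree st.2.1.length (pvUsed st.2.2 (pvKeysB c)))))

def get_disjoint_subsets_from_opchains_alt (op_chains : List (List (Int × List Int))) :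
    List (List (List (List (Int × List Int)))) :=
  let st := op_chains.foldl pvStepB (([[]], PySem.Dict.empty), ([[]], PySem.Dict.empty))
  [st.1.1, st.2.1]

-- ===== PRECONDITION & SPEC =====
def Spec_get_disjoint_subsets_from_opchains (op_chains : List (List (Int × List Int))) (out : List (List (List (List (Int × List Int))))) : Prop := out = get_disjoint_subsets_from_opchains_alt op_chains
instance (op_chains : List (List (Int × List Int))) (out : List (List (List (List (Int × List Int))))) : Decidable (Spec_get_disjoint_subsets_from_opchains op_chains out) := by unfold Spec_get_disjoint_subsets_from_opchains; infer_instance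

-- ===== CLAIM (what is proved, stated in full; the proofs are below) =====
def Claim_equal_get_disjoint_subsets_from_opchains : Prop := ∀ (op_chains : List (List (Int × List Int))), Dom_get_disjoint_subsets_from_opchains op_chains → Spec_get_disjoint_subsets_from_opchains op_chains (get_disjoint_subsets_from_opchains op_chains)

-- ===== LEMMAS AND PROOFS =====

-- the layer index A's while-loop settles on
def pvIdx (c : List (Int × List Int)) : List (List (List (Int × List Int))) → Nat
  | [] => 0
  | l :: ls => if pvIsDisjointLayer l c then 0 else pvIdx c ls + 1

-- invariant tying B's inverted index to the layer list
def pvInv (layers : List (List (List (Int × List Int)))) (occ : PySem.Dict Int (List Nat)) : Prop :=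
  ∀ (s : Int) (k : Nat),
    k ∈ occ.getD s PySem.Set.empty ↔ ∃ c' ∈ layers.getD k [], s ∈ c'.map Prod.fst

lemma pv_mem_used (occ : PySem.Dict Int (List Nat)) (ks : List Int) (k : Nat) :
    k ∈ pvUsed occ ks ↔ ∃ s ∈ ks, k ∈ occ.getD s PySem.Set.empty := by
  have aux : ∀ (ks : List Int) (u : List Nat),
      k ∈ ks.foldl (fun u s => PySem.Set.union u (occ.getD s PySem.Set.empty)) u ↔
        k ∈ u ∨ ∃ s ∈ ks, k ∈ occ.getD s PySem.Set.empty := by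
    intro ks
    induction ks with
    | nil => intro u; simp
    | cons a t ih =>
      intro u
      simp only [List.foldl_cons, ih, PySem.Set.mem_union, List.mem_cons]
      constructor
      · rintro ((h | h) | ⟨s, hs, h⟩)
        · exact Or.inl h
        · exact Or.inr ⟨a, Or.inl rfl, h⟩
        · exact Or.inr ⟨s, Or.inr hs, h⟩
      · rintro (h | ⟨s, (rfl | hs), h⟩)
        · exact Or.inl (Or.inl h)
        · exact Or.inl (Or.inr h)
        · exact Or.inr ⟨s, hs, h⟩
  have := aux ks PySem.Set.empty
  simp only [pvUsed, this]
  simp [PySem.Set.empty]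

lemma pv_len0_iff (X : List Int) : ((PySem.Set.len X == 0) = true) ↔ X = [] := by
  simp [PySem.Set.len, List.length_eq_zero_iff]

lemma pv_disjoint_false_iff (l : List (List (Int × List Int))) (c : List (Int × List Int)) :
    pvIsDisjointLayer l c = false ↔
      ∃ c' ∈ l, ∃ s, s ∈ c.map Prod.fst ∧ s ∈ c'.map Prod.fst := by
  have hone : ∀ c' : List (Int × List Int),
      ((PySem.Set.len (PySem.Set.inter (pvKeysA c) (pvKeysA c')) == 0) = true)
        ↔ ∀ s : Int, ¬(s ∈ c.map Prod.fst ∧ s ∈ c'.map Prod.fst) := by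
    intro c'
    rw [pv_len0_iff]
    constructor
    · intro hnil s hs
      have hmem : s ∈ PySem.Set.inter (pvKeysA c) (pvKeysA c') :=
        (PySem.Set.mem_inter _ _ _).mpr
          ⟨by simpa [pvKeysA, PySem.Set.mem_ofList] using hs.1,
           by simpa [pvKeysA, PySem.Set.mem_ofList] using hs.2⟩
      simp [hnil] at hmem
    · intro h
      refine List.eq_nil_iff_forall_not_mem.mpr (fun s hs => ?_)
      rw [PySem.Set.mem_inter] at hs
      exact h s ⟨by simpa [pvKeysA, PySem.Set.mem_ofList] using hs.1,
                 by simpa [pvKeysA, PySem.Set.mem_ofList] using hs.2⟩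
  constructor
  · intro hfalse
    by_contra hno
    push Not at hno
    have htrue : pvIsDisjointLayer l c = true := by
      simp only [pvIsDisjointLayer, List.all_eq_true]
      intro c' hc'
      rw [hone c']
      intro s hs
      exact (hno c' hc' s hs.1) hs.2
    rw [htrue] at hfalse
    cases hfalse
  · rintro ⟨c', hc', s, h1, h2⟩
    cases hval : pvIsDisjointLayer l c with
    | false => rfl
    | true =>
      exfalso
      have hall := hval
      simp only [pvIsDisjointLayer, List.all_eq_true] at hall
      exact (hone c').mp (hall c' hc') s ⟨h1, h2⟩

lemma pv_idx_le (c : List (Int × List Int)) :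
    ∀ layers, pvIdx c layers ≤ layers.length := by
  intro layers
  induction layers with
  | nil => simp [pvIdx]
  | cons l ls ih =>
    cases hb : pvIsDisjointLayer l c with
    | true => simp [pvIdx, hb]
    | false => simp only [pvIdx, hb, Bool.false_eq_true, if_false, List.length_cons]; omega

lemma pv_idx_lt_spec (c : List (Int × List Int)) :
    ∀ layers j, j < pvIdx c layers → pvIsDisjointLayer (layers.getD j []) c = false := by
  intro layers
  induction layers with
  | nil => intro j h; simp [pvIdx] at h
  | cons l ls ih =>
    intro j h
    cases hb : pvIsDisjointLayer l c with
    | true => simp [pvIdx, hb] at h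
    | false =>
      cases j with
      | zero => simpa using hb
      | succ j' =>
        simp only [pvIdx, hb, Bool.false_eq_true, if_false] at h
        simpa using ih j' (by omega)

lemma pv_idx_self_spec (c : List (Int × List Int)) :
    ∀ layers, pvIdx c layers < layers.length →
      pvIsDisjointLayer (layers.getD (pvIdx c layers) []) c = true := by
  intro layers
  induction layers with
  | nil => intro h; simp [pvIdx] at h
  | cons l ls ih =>
    intro h
    cases hb : pvIsDisjointLayer l c with
    | true => simp [pvIdx, hb]
    | false =>
      simp only [pvIdx, hb, Bool.false_eq_true, if_false] at h ⊢
      simpa using ih (by simpa using Nat.lt_of_succ_lt_succ h)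

lemma pv_find_range (p : Nat → Bool) :
    ∀ (m n : Nat), n < m → p n = true → (∀ j, j < n → p j = false) →
      (List.range m).find? p = some n := by
  intro m
  induction m with
  | zero => intro n hn _ _; exact absurd hn (Nat.not_lt_zero n)
  | succ m ih =>
    intro n hn hp hlt
    rw [List.range_succ, List.find?_append]
    by_cases h : n < m
    · rw [ih n h hp hlt]; rfl
    · have hnm : n = m := by omega
      subst hnm
      have hnone : (List.range n).find? p = none := by
        rw [List.find?_eq_none]
        intro x hx
        simp only [List.mem_range] at hx
        simp [hlt x hx]
      rw [hnone]
      simp [List.find?, hp]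

lemma pv_firstFree_eq (layers : List (List (List (Int × List Int))))
    (occ : PySem.Dict Int (List Nat)) (c : List (Int × List Int)) (hInv : pvInv layers occ) :
    pvFirstFree layers.length (pvUsed occ (pvKeysA c)) = pvIdx c layers := by
  have hcontains : ∀ k : Nat,
      ((pvUsed occ (pvKeysA c)).contains k = true) ↔
        pvIsDisjointLayer (layers.getD k []) c = false := by
    intro k
    rw [List.contains_iff_mem, pv_mem_used, pv_disjoint_false_iff]
    constructor
    · rintro ⟨s, hs, hk⟩
      obtain ⟨c', hc', hsc'⟩ := (hInv s k).1 hk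
      exact ⟨c', hc', s, by simpa [pvKeysA, PySem.Set.mem_ofList] using hs, hsc'⟩
    · rintro ⟨c', hc', s, hs1, hs2⟩
      exact ⟨s, by simpa [pvKeysA, PySem.Set.mem_ofList] using hs1,
        (hInv s k).2 ⟨c', hc', hs2⟩⟩
  have hfind : (List.range (layers.length + 1)).find?
      (fun k => !((pvUsed occ (pvKeysA c)).contains k)) = some (pvIdx c layers) := by
    apply pv_find_range
    · exact Nat.lt_succ_of_le (pv_idx_le c layers)
    · show (!((pvUsed occ (pvKeysA c)).contains (pvIdx c layers))) = true
      rw [Bool.not_eq_true']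
      cases hcon : (pvUsed occ (pvKeysA c)).contains (pvIdx c layers) with
      | false => rfl
      | true =>
        exfalso
        have hd := (hcontains _).1 hcon
        by_cases hlt : pvIdx c layers < layers.length
        · rw [pv_idx_self_spec c layers hlt] at hd
          cases hd
        · rw [List.getD_eq_default _ _ (le_of_not_gt hlt)] at hd
          simp [pvIsDisjointLayer] at hd
    · intro j hj
      have hc2 := (hcontains j).2 (pv_idx_lt_spec c layers j hj)
      show (!((pvUsed occ (pvKeysA c)).contains j)) = false
      rw [hc2]
      rfl
  unfold pvFirstFree
  rw [hfind]
  rfl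

lemma pv_place_eq (c : List (Int × List Int)) :
    ∀ layers, pvPlaceA c layers = pvExtendAt layers (pvIdx c layers) c := by
  intro layers
  induction layers with
  | nil => rfl
  | cons l ls ih =>
    cases hb : pvIsDisjointLayer l c with
    | true => simp [pvPlaceA, pvIdx, hb, pvExtendAt, List.modify]
    | false =>
      have hstep : pvExtendAt (l :: ls) (pvIdx c ls + 1) c
          = l :: pvExtendAt ls (pvIdx c ls) c := by
        unfold pvExtendAt
        by_cases h : pvIdx c ls = ls.length
        · simp [h, List.modify]
        · have h1 : ((pvIdx c ls + 1) == (l :: ls).length) = false := by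
            simp [h]
          have h2 : ((pvIdx c ls) == ls.length) = false := by simp [h]
          simp [h2, List.modify]
      simp [pvPlaceA, pvIdx, hb, hstep, ih]

lemma pv_placeA_getD (c : List (Int × List Int)) :
    ∀ layers k, (pvPlaceA c layers).getD k [] =
      if k = pvIdx c layers then layers.getD (pvIdx c layers) [] ++ [c] else layers.getD k [] := by
  intro layers
  induction layers with
  | nil =>
    intro k
    cases k with
    | zero => simp [pvPlaceA, pvIdx]
    | succ k' => simp [pvPlaceA, pvIdx]
  | cons l ls ih =>
    intro k
    cases hb : pvIsDisjointLayer l c with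
    | true =>
      cases k with
      | zero => simp [pvPlaceA, pvIdx, hb]
      | succ k' => simp [pvPlaceA, pvIdx, hb]
    | false =>
      cases k with
      | zero => simp [pvPlaceA, pvIdx, hb]
      | succ k' =>
        simp only [pvPlaceA, pvIdx, hb, Bool.false_eq_true, if_false, List.getD_cons_succ]
        rw [ih k']
        by_cases h : k' = pvIdx c ls <;> simp [h]

lemma pv_occAdd_getD (i : Nat) :
    ∀ (ks : List Int) (occ : PySem.Dict Int (List Nat)) (s : Int),
      (pvOccAdd occ ks i).getD s PySem.Set.empty =
        if s ∈ ks then PySem.Set.add (occ.getD s PySem.Set.empty) i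
        else occ.getD s PySem.Set.empty := by
  intro ks
  induction ks with
  | nil => intro occ s; simp [pvOccAdd]
  | cons a t ih =>
    intro occ s
    have hrw : pvOccAdd occ (a :: t) i
        = pvOccAdd (occ.insert a (PySem.Set.add (occ.getD a PySem.Set.empty) i)) t i := rfl
    rw [hrw, ih, PySem.Dict.getD_insert]
    by_cases hsa : s = a
    · subst hsa
      by_cases hst : s ∈ t
      · simp [hst]
      · simp [hst]
    · by_cases hst : s ∈ t <;> simp [hsa, hst]

lemma pv_inv_preserve (layers : List (List (List (Int × List Int))))
    (occ : PySem.Dict Int (List Nat)) (c : List (Int × List Int)) (hInv : pvInv layers occ) :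
    pvInv (pvPlaceA c layers) (pvOccAdd occ (pvKeysA c) (pvIdx c layers)) := by
  intro s k
  rw [pv_occAdd_getD, pv_placeA_getD]
  have hsk : s ∈ pvKeysA c ↔ s ∈ c.map Prod.fst := by
    simp [pvKeysA, PySem.Set.mem_ofList]
  by_cases hs : s ∈ c.map Prod.fst
  · rw [if_pos (hsk.mpr hs), PySem.Set.mem_add]
    by_cases hk : k = pvIdx c layers
    · subst hk
      rw [if_pos rfl]
      exact iff_of_true (Or.inr rfl) ⟨c, List.mem_append_right _ (List.mem_singleton.mpr rfl), hs⟩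
    · rw [if_neg hk]
      constructor
      · rintro (h | h)
        · exact (hInv s k).1 h
        · exact absurd h hk
      · intro h
        exact Or.inl ((hInv s k).2 h)
  · rw [if_neg (fun h => hs (hsk.mp h))]
    by_cases hk : k = pvIdx c layers
    · subst hk
      rw [if_pos rfl, hInv s (pvIdx c layers)]
      constructor
      · rintro ⟨c', h1, h2⟩
        exact ⟨c', List.mem_append_left _ h1, h2⟩
      · rintro ⟨c', h1, h2⟩
        rcases List.mem_append.mp h1 with h | h
        · exact ⟨c', h, h2⟩
        · rw [List.mem_singleton] at h
          subst h
          exact absurd h2 hs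
    · rw [if_neg hk]
      exact hInv s k

lemma pv_inv_init : pvInv [[]] PySem.Dict.empty := by
  intro s k
  cases k <;> simp [PySem.Set.empty, PySem.Dict.getD_empty]

lemma pv_fold_eq :
    ∀ (chains : List (List (Int × List Int))) ss occS bw occB,
      pvInv ss occS → pvInv bw occB →
      chains.foldl pvStepA (ss, bw) =
        ((chains.foldl pvStepB ((ss, occS), (bw, occB))).1.1,
         (chains.foldl pvStepB ((ss, occS), (bw, occB))).2.1) := by
  intro chains
  induction chains with
  | nil => intro ss occS bw occB _ _; rfl
  | cons c t ih =>
    intro ss occS bw occB hS hB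
    simp only [List.foldl_cons]
    have hkB : pvKeysB c = pvKeysA c := rfl
    cases hc : (PySem.Set.len (pvKeysA c) == 1) with
    | true =>
      have hA : pvStepA (ss, bw) c = (pvPlaceA c ss, bw) := by
        unfold pvStepA
        rw [if_pos hc]
      have hBst : pvStepB ((ss, occS), (bw, occB)) c
          = ((pvPlaceA c ss, pvOccAdd occS (pvKeysA c) (pvIdx c ss)), (bw, occB)) := by
        unfold pvStepB
        rw [hkB, if_pos hc, pv_firstFree_eq ss occS c hS, ← pv_place_eq]
      rw [hA, hBst]
      exact ih _ _ _ _ (pv_inv_preserve ss occS c hS) hB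
    | false =>
      have hA : pvStepA (ss, bw) c = (ss, pvPlaceA c bw) := by
        unfold pvStepA
        rw [if_neg (by intro h; simp [PySem.Set.len] at h hc; exact hc h)]
      have hBst : pvStepB ((ss, occS), (bw, occB)) c
          = ((ss, occS), (pvPlaceA c bw, pvOccAdd occB (pvKeysA c) (pvIdx c bw))) := by
        unfold pvStepB
        rw [hkB, if_neg (by intro h; simp [PySem.Set.len] at h hc; exact hc h), pv_firstFree_eq bw occB c hB, ← pv_place_eq]
      rw [hA, hBst]
      exact ih _ _ _ _ hS (pv_inv_preserve bw occB c hB)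

-- ===== VERDICT (by name: the statement is the Claim_ definition above) =====
theorem get_disjoint_subsets_from_opchains_spec : Claim_equal_get_disjoint_subsets_from_opchains := by
  intro op_chains _
  unfold Spec_get_disjoint_subsets_from_opchains
  unfold get_disjoint_subsets_from_opchains get_disjoint_subsets_from_opchains_alt
  rw [pv_fold_eq op_chains [[]] PySem.Dict.empty [[]] PySem.Dict.empty pv_inv_init pv_inv_init]
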